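-- pv_equiv track=rewrite | github.com/SleepyCloud023/coding-test-study-note | DP/boj_2156/boj_2156.py | solution
-- ===== SOURCE A (Python) =====
-- def solution(N, wine):
--     # 3 x N
--     dp = [[0] * 3 for _ in range(N)]
--     dp[0] = [0, wine[0], wine[0]]
--
--     # 0 .... N-2
--     for i in range(N - 1):
--         # i+1번째 와인
--         prev_0 = dp[i][0]
--         prev_1 = dp[i][1]
--         prev_2 = dp[i][2]
--
--         dp[i+1][0] = max(prev_0, prev_1, prev_2)
--         dp[i+1][1] = prev_0 + wine[i+1]
--         dp[i+1][2] = prev_1 + wine[i+1]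
--
--     return max(dp[N-1])
-- ===== SOURCE B (Python) =====
-- def solution(N, wine):
--     # 1-D DP: dp[i] = best total over glasses 0..i (skipping allowed, no 3 in a row)
--     dp = []
--     for i in range(N):
--         best = max(dp[i - 1] if i >= 1 else 0,
--                    wine[i] + (dp[i - 2] if i >= 2 else 0))
--         if i >= 1:
--             best = max(best, wine[i] + wine[i - 1] + (dp[i - 3] if i >= 3 else 0))
--         dp.append(best)
--     return dp[N - 1]
-- ===== Notes on version B (the rewrite author's own statement) =====
-- stated objective: simpler
-- what changed: Replaces A's 3-state N x 3 DP table (skip / first glass / second consecutive glass) with a single 1-D dp array where dp[i] is the best total over glasses 0..i, computed by looking back up to three positions.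
import Mathlib
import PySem

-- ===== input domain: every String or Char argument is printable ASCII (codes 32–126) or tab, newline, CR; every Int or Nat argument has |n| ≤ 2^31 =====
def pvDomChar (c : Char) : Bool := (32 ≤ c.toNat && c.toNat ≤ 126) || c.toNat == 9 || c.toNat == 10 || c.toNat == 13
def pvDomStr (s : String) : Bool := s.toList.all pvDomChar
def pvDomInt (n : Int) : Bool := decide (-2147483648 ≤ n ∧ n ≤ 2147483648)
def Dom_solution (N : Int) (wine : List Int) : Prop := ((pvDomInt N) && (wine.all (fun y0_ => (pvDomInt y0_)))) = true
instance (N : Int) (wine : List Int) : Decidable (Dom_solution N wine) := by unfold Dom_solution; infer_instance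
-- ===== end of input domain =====

-- B replaces A's 3-state 2-D table with a single 1-D dp array looking back up to
-- three positions; equivalence is proved on 1 ≤ N ≤ len(wine) (elsewhere A raises).

-- ===== PORT A =====
-- indexing uses getD: on Pre_ every index is nonnegative and in range, where getD is exact
def solution (N : Int) (wine : List Int) : Int :=
  let dp0 : List (List Int) := List.replicate N.toNat [0, 0, 0]
  let dp1 := dp0.set 0 [0, wine.getD 0 0, wine.getD 0 0]
  let dp := (List.range (N - 1).toNat).foldl (fun dp i =>
      let prev0 := (dp.getD i []).getD 0 0
      let prev1 := (dp.getD i []).getD 1 0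
      let prev2 := (dp.getD i []).getD 2 0
      dp.set (i + 1) [max (max prev0 prev1) prev2,
                      prev0 + wine.getD (i + 1) 0,
                      prev1 + wine.getD (i + 1) 0]) dp1
  let row := dp.getD (N - 1).toNat []
  max (max (row.getD 0 0) (row.getD 1 0)) (row.getD 2 0)

-- ===== PORT B =====
def solution_alt (N : Int) (wine : List Int) : Int :=
  let dp := (List.range N.toNat).foldl (fun dp i =>
      let best := max (if 1 ≤ i then dp.getD (i - 1) 0 else 0)
                      (wine.getD i 0 + (if 2 ≤ i then dp.getD (i - 2) 0 else 0))
      let best := if 1 ≤ i then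
          max best (wine.getD i 0 + wine.getD (i - 1) 0 +
                    (if 3 ≤ i then dp.getD (i - 3) 0 else 0))
        else best
      dp ++ [best]) []
  dp.getD (N - 1).toNat 0

-- ===== PRECONDITION & SPEC =====
-- A raises IndexError when N < 1 (dp[0] on an empty table) or N > len(wine); Pre_ excludes exactly those.
def Pre_solution (N : Int) (wine : List Int) : Prop := 1 ≤ N ∧ N ≤ wine.length
instance (N : Int) (wine : List Int) : Decidable (Pre_solution N wine) := by unfold Pre_solution; infer_instance
def pvWitness_solution : Int × List Int := (3, [6, 10, 13])

def Spec_solution (N : Int) (wine : List Int) (out : Int) : Prop := out = solution_alt N wine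
instance (N : Int) (wine : List Int) (out : Int) : Decidable (Spec_solution N wine out) := by unfold Spec_solution; infer_instance

-- ===== CLAIM (what is proved, stated in full; the proofs are below) =====
def Claim_equal_solution : Prop := ∀ (N : Int) (wine : List Int), Dom_solution N wine → Pre_solution N wine → Spec_solution N wine (solution N wine)

-- ===== LEMMAS AND PROOFS =====

-- A's dp row i, as a recurrence
def rowA (w : List Int) : Nat → List Int
  | 0 => [0, w.getD 0 0, w.getD 0 0]
  | i + 1 =>
      let r := rowA w i
      [max (max (r.getD 0 0) (r.getD 1 0)) (r.getD 2 0),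
       r.getD 0 0 + w.getD (i + 1) 0,
       r.getD 1 0 + w.getD (i + 1) 0]

-- B's dp value at index i, as a recurrence
def dB (w : List Int) : Nat → Int
  | 0 => max 0 (w.getD 0 0)
  | i + 1 =>
      max (max (dB w i) (w.getD (i + 1) 0 + (if 2 ≤ i + 1 then dB w (i + 1 - 2) else 0)))
          (w.getD (i + 1) 0 + w.getD (i + 1 - 1) 0 +
            (if 3 ≤ i + 1 then dB w (i + 1 - 3) else 0))
  decreasing_by all_goals omega

theorem bridge (w : List Int) : ∀ i : Nat,
    (rowA w i).getD 0 0 = (if 1 ≤ i then dB w (i - 1) else 0) ∧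
    (rowA w i).getD 1 0 = w.getD i 0 + (if 2 ≤ i then dB w (i - 2) else 0) ∧
    max (max ((rowA w i).getD 0 0) ((rowA w i).getD 1 0)) ((rowA w i).getD 2 0) = dB w i := by
  intro i
  induction i with
  | zero =>
    refine ⟨by simp [rowA], by simp [rowA], ?_⟩
    simp [rowA, dB]
  | succ i ih =>
    obtain ⟨ih0, ih1, ih3⟩ := ih
    have c1 : (2 ≤ i + 1) ↔ (1 ≤ i) := by omega
    have c2 : (3 ≤ i + 1) ↔ (2 ≤ i) := by omega
    have e1 : i + 1 - 2 = i - 1 := by omega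
    have e2 : i + 1 - 3 = i - 2 := by omega
    refine ⟨?_, ?_, ?_⟩
    · simp only [rowA, List.getD_cons_zero, ih3]
      simp
    · simp only [rowA, List.getD_cons_succ, List.getD_cons_zero, ih0]
      simp only [c1, e1]
      exact add_comm _ _
    · simp only [rowA, List.getD_cons_succ, List.getD_cons_zero]
      rw [ih3, ih0, ih1, dB]
      simp only [c1, c2, e1, e2, Nat.add_sub_cancel]
      congr 1
      · congr 1
        ring
      · ring

theorem invA (w : List Int) (n : Nat) (hn : 1 ≤ n) : ∀ t : Nat, t ≤ n - 1 →
    let dp := (List.range t).foldl (fun dp i =>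
      let prev0 := (dp.getD i []).getD 0 0
      let prev1 := (dp.getD i []).getD 1 0
      let prev2 := (dp.getD i []).getD 2 0
      dp.set (i + 1) [max (max prev0 prev1) prev2,
                      prev0 + w.getD (i + 1) 0,
                      prev1 + w.getD (i + 1) 0])
      ((List.replicate n ([0, 0, 0] : List Int)).set 0 [0, w.getD 0 0, w.getD 0 0])
    dp.length = n ∧ ∀ j : Nat, j < n → dp.getD j [] = if j ≤ t then rowA w j else [0, 0, 0] := by
  intro t
  induction t with
  | zero =>
    intro _
    refine ⟨by simp, ?_⟩
    intro j hj
    match j with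
    | 0 =>
      have h0 : (0:Nat) < ((List.replicate n ([0,0,0] : List Int)).set 0 [0, w.getD 0 0, w.getD 0 0]).length := by
        simpa using hn
      simp [List.getD_eq_getElem?_getD, rowA, hj]
    | j + 1 =>
      simp [List.getD_eq_getElem?_getD, hj]
  | succ t ih =>
    intro ht
    have ih' := ih (by omega)
    obtain ⟨ihl, ihg⟩ := ih'
    rw [List.range_succ, List.foldl_append, List.foldl_cons, List.foldl_nil]
    simp only []
    rw [ihg t (by omega)]
    rw [if_pos (by omega : t ≤ t)]
    constructor
    · simpa using ihl
    · intro j hj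
      by_cases hjt : j = t + 1
      · subst hjt
        rw [List.getD_eq_getElem?_getD]
        rw [List.getElem?_set_self (by rw [ihl]; omega)]
        rw [if_pos (by omega : t + 1 ≤ t + 1)]
        simp [rowA]
      · rw [List.getD_eq_getElem?_getD, List.getElem?_set_ne (Ne.symm hjt), ← List.getD_eq_getElem?_getD]
        rw [ihg j hj]
        by_cases hle : j ≤ t
        · rw [if_pos hle, if_pos (by omega : j ≤ t + 1)]
        · rw [if_neg hle, if_neg (by omega : ¬ j ≤ t + 1)]

theorem invB (w : List Int) : ∀ t : Nat,
    (List.range t).foldl (fun dp i =>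
      let best := max (if 1 ≤ i then dp.getD (i - 1) 0 else 0)
                      (w.getD i 0 + (if 2 ≤ i then dp.getD (i - 2) 0 else 0))
      let best := if 1 ≤ i then
          max best (w.getD i 0 + w.getD (i - 1) 0 +
                    (if 3 ≤ i then dp.getD (i - 3) 0 else 0))
        else best
      dp ++ [best]) [] = (List.range t).map (dB w) := by
  intro t
  induction t with
  | zero => simp
  | succ t ih =>
    rw [List.range_succ, List.foldl_append, ih, List.map_append, List.foldl_cons, List.foldl_nil,
        List.map_cons, List.map_nil]
    simp only []
    congr 1
    match t with
    | 0 => simp [dB]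
    | i + 1 =>
      have h1 : (1:Nat) ≤ i + 1 := by omega
      have hget : ∀ j : Nat, j < i + 1 →
          ((List.range (i+1)).map (dB w)).getD j 0 = dB w j := by
        intro j hj
        simp [List.getD_eq_getElem?_getD, hj]
      rw [if_pos h1, if_pos h1, dB]
      simp only [Nat.add_sub_cancel]
      rw [hget i (by omega)]
      by_cases h2 : 2 ≤ i + 1
      · rw [if_pos h2, if_pos h2, hget (i + 1 - 2) (by omega)]
        by_cases h3 : 3 ≤ i + 1
        · rw [if_pos h3, if_pos h3, hget (i + 1 - 3) (by omega)]
        · rw [if_neg h3, if_neg h3]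
      · rw [if_neg h2, if_neg h2]
        by_cases h3 : 3 ≤ i + 1
        · omega
        · rw [if_neg h3, if_neg h3]

-- ===== VERDICT (by name: the statement is the Claim_ definition above) =====
theorem solution_spec : Claim_equal_solution := by
  intro N wine _ hPre
  obtain ⟨h1, h2⟩ := hPre
  unfold Spec_solution solution solution_alt
  simp only []
  have hn : 1 ≤ N.toNat := by omega
  have hN1 : (N - 1).toNat = N.toNat - 1 := by omega
  obtain ⟨hl, hg⟩ := invA wine N.toNat hn (N.toNat - 1) (le_refl _)
  rw [hN1]
  rw [hg (N.toNat - 1) (by omega), if_pos (le_refl _)]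
  rw [invB wine N.toNat]
  have hmap : ((List.range N.toNat).map (dB wine)).getD (N.toNat - 1) 0 = dB wine (N.toNat - 1) := by
    simp [List.getD_eq_getElem?_getD, (by omega : N.toNat - 1 < N.toNat)]
  rw [hmap]
  exact (bridge wine (N.toNat - 1)).2.2
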